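-- pv_equiv track=rewrite | github.com/HighFive2512/Homework | Python Fundamentals/Text Processing/Winning ticket v2.py | check_if_winning_ticket
-- ===== SOURCE A (Python) =====
-- def check_if_winning_ticket(ticket):
--     ticket = ticket.strip()
--     if len(ticket) != 20:
--         return "invalid ticket"
--     firsthalf = ticket[:10]
--     secondhalf = ticket[10:]
--     for eachsymbol in ("@", "#", "$", "^"):
--         for eachindx in range(10, 5, -1):
--             repetition = eachindx * eachsymbol
--             if repetition in firsthalf and repetition in secondhalf:
--                 if len(repetition) == 10:
--                     return f'ticket "{ticket}" - {len(repetition)}{eachsymbol} Jackpot!'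
--                 elif len(repetition) != 10:
--                     return f'ticket "{ticket}" - {len(repetition)}{eachsymbol}'
--
--     return f'ticket "{ticket}" - no match'
-- ===== SOURCE B (Python) =====
-- def check_if_winning_ticket(ticket):
--     ticket = ticket.strip()
--     if len(ticket) != 20:
--         return "invalid ticket"
--     first, second = ticket[:10], ticket[10:]
--
--     def max_run(half, sym):
--         best = cur = 0
--         for ch in half:
--             cur = cur + 1 if ch == sym else 0
--             best = max(best, cur)
--         return best
--
--     for sym in "@#$^":
--         m = min(max_run(first, sym), max_run(second, sym))
--         if m >= 6:
--             tail = " Jackpot!" if m == 10 else ""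
--             return f'ticket "{ticket}" - {m}{sym}{tail}'
--     return f'ticket "{ticket}" - no match'
-- ===== Notes on version B (the rewrite author's own statement) =====
-- stated objective: simpler
-- what changed: Replaces the 40 substring-membership tests (4 symbols x 5 lengths, each a quadratic 'in' scan) with one run-length scan per half and symbol, then a single comparison m = min(run_first, run_second) >= 6 deciding the message.
import Mathlib
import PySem

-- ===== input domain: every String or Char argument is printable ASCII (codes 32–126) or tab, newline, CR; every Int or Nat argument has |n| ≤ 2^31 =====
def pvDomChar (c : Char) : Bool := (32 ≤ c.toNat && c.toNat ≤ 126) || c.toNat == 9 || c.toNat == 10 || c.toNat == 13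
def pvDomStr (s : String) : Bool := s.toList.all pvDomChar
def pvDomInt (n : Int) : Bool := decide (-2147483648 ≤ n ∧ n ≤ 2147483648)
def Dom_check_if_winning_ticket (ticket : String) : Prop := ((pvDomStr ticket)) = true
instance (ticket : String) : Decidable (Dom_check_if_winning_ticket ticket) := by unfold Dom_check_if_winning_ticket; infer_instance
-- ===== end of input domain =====

-- B replaces A's 40 substring-membership tests by one run-length scan per half
-- and symbol plus a single min-comparison (objective: simpler).

-- ===== PORT A =====
-- inner loop: for eachindx in range(10, 5, -1)
def pvA_scan (t f s : List Char) (sym : Char) : List Nat → Option String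
  | [] => none
  | k :: rest =>
    -- repetition = eachindx * eachsymbol  (Python str*int = replicate, exact)
    let rep := List.replicate k sym
    if PySem.Chars.isIn rep f && PySem.Chars.isIn rep s then
      if rep.length == 10 then
        some ("ticket \"" ++ String.mk t ++ "\" - " ++ PySem.Int.toStr (rep.length : Int)
              ++ String.mk [sym] ++ " Jackpot!")
      else
        some ("ticket \"" ++ String.mk t ++ "\" - " ++ PySem.Int.toStr (rep.length : Int)
              ++ String.mk [sym])
    else pvA_scan t f s sym rest

-- outer loop: for eachsymbol in ("@", "#", "$", "^")
def pvA_syms (t f s : List Char) : List Char → Option String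
  | [] => none
  | sym :: rest =>
    match pvA_scan t f s sym [10, 9, 8, 7, 6] with
    | some r => some r
    | none => pvA_syms t f s rest

def check_if_winning_ticket (ticket : String) : String :=
  let t := (PySem.Str.strip ticket).toList
  if t.length ≠ 20 then "invalid ticket"
  else
    let f := PySem.Chars.slice t none (some 10)
    let s := PySem.Chars.slice t (some 10) none
    (pvA_syms t f s ['@', '#', '$', '^']).getD
      ("ticket \"" ++ String.mk t ++ "\" - no match")

-- ===== PORT B =====
def pvB_step (sym : Char) (p : Nat × Nat) (ch : Char) : Nat × Nat :=
  let cur := if ch == sym then p.2 + 1 else 0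
  (max p.1 cur, cur)

-- best = cur = 0; for ch in half: cur = cur+1 if ch == sym else 0; best = max(best, cur)
def pvB_maxRun (half : List Char) (sym : Char) : Nat :=
  (half.foldl (pvB_step sym) (0, 0)).1

-- for sym in "@#$^": m = min(...); if m >= 6: return …
def pvB_loop (t f s : List Char) : List Char → String
  | [] => "ticket \"" ++ String.mk t ++ "\" - no match"
  | sym :: rest =>
    let m := min (pvB_maxRun f sym) (pvB_maxRun s sym)
    if 6 ≤ m then
      "ticket \"" ++ String.mk t ++ "\" - " ++ PySem.Int.toStr (m : Int) ++ String.mk [sym]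
        ++ (if m == 10 then " Jackpot!" else "")
    else pvB_loop t f s rest

def check_if_winning_ticket_alt (ticket : String) : String :=
  let t := (PySem.Str.strip ticket).toList
  if t.length ≠ 20 then "invalid ticket"
  else pvB_loop t (PySem.Chars.slice t none (some 10))
                  (PySem.Chars.slice t (some 10) none) ['@', '#', '$', '^']

-- ===== PRECONDITION & SPEC =====
def Spec_check_if_winning_ticket (ticket : String) (out : String) : Prop := out = check_if_winning_ticket_alt ticket
instance (ticket : String) (out : String) : Decidable (Spec_check_if_winning_ticket ticket out) := by unfold Spec_check_if_winning_ticket; infer_instance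

-- ===== CLAIM (what is proved, stated in full; the proofs are below) =====
def Claim_equal_check_if_winning_ticket : Prop := ∀ (ticket : String), Dom_check_if_winning_ticket ticket → Spec_check_if_winning_ticket ticket (check_if_winning_ticket ticket)


-- ===== LEMMAS AND PROOFS =====

-- Characterisation of B's fold: the second component is the length of the longest
-- sym-suffix run, the first the longest sym-run anywhere; replicate k sym is a
-- suffix/infix iff k is at most these; both are bounded by the length.
theorem pv_fold_char (sym : Char) (l : List Char) :
    (∀ k : Nat, 1 ≤ k →
        ((List.replicate k sym <:+ l ↔ k ≤ (l.foldl (pvB_step sym) (0, 0)).2)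
          ∧ (List.replicate k sym <:+: l ↔ k ≤ (l.foldl (pvB_step sym) (0, 0)).1)))
      ∧ (l.foldl (pvB_step sym) (0, 0)).2 ≤ l.length
      ∧ (l.foldl (pvB_step sym) (0, 0)).1 ≤ l.length := by
  induction l using List.reverseRecOn with
  | nil =>
    refine ⟨fun k hk => ⟨?_, ?_⟩, by simp, by simp⟩
    · simp only [List.suffix_nil, List.replicate_eq_nil_iff, List.foldl_nil]
      omega
    · simp only [List.infix_nil, List.replicate_eq_nil_iff, List.foldl_nil]
      omega
  | append_singleton l x ih =>
    obtain ⟨ihk, ih2, ih1⟩ := ih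
    have hstep : (l ++ [x]).foldl (pvB_step sym) (0, 0)
        = pvB_step sym (l.foldl (pvB_step sym) (0, 0)) x := by
      simp [List.foldl_append]
    have hsuf : ∀ k : Nat, 1 ≤ k →
        (List.replicate k sym <:+ l ++ [x] ↔
          k ≤ ((l ++ [x]).foldl (pvB_step sym) (0, 0)).2) := by
      intro k hk
      obtain ⟨j, rfl⟩ : ∃ j, k = j + 1 := ⟨k - 1, by omega⟩
      rw [hstep, ← List.reverse_prefix]
      rw [show (l ++ [x]).reverse = x :: l.reverse by simp]
      rw [List.reverse_replicate, List.replicate_succ, List.cons_prefix_cons]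
      by_cases hx : x = sym
      · rw [hx]
        rcases Nat.eq_zero_or_pos j with hj | hj
        · subst hj; simp [pvB_step]
        · have hrev : (List.replicate j sym <+: l.reverse) ↔ (List.replicate j sym <:+ l) := by
            conv_lhs => rw [← List.reverse_replicate]
            exact List.reverse_prefix
          rw [hrev, (ihk j hj).1]
          simp [pvB_step]
      · have hx' : ¬ sym = x := fun h => hx h.symm
        simp [pvB_step, hx, hx']
    have hinf : ∀ k : Nat, 1 ≤ k →
        (List.replicate k sym <:+: l ++ [x] ↔
          k ≤ ((l ++ [x]).foldl (pvB_step sym) (0, 0)).1) := by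
      intro k hk
      rw [← List.reverse_infix]
      rw [show (l ++ [x]).reverse = x :: l.reverse by simp]
      rw [List.reverse_replicate, List.infix_cons_iff]
      have hpref : (List.replicate k sym <+: x :: l.reverse)
          ↔ (List.replicate k sym <:+ l ++ [x]) := by
        conv_lhs => rw [← List.reverse_replicate]
        rw [show x :: l.reverse = (l ++ [x]).reverse by simp]
        exact List.reverse_prefix
      have hint : (List.replicate k sym <:+: l.reverse)
          ↔ (List.replicate k sym <:+: l) := by
        conv_lhs => rw [← List.reverse_replicate]
        exact List.reverse_infix
      rw [hpref, hsuf k hk, hint, (ihk k hk).2, hstep]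
      simp [pvB_step]
      rcases le_total ((l.foldl (pvB_step sym) (0, 0)).1)
        (if x == sym then (l.foldl (pvB_step sym) (0, 0)).2 + 1 else 0) with h | h <;>
        split_ifs at * <;> omega
    refine ⟨fun k hk => ⟨hsuf k hk, hinf k hk⟩, ?_, ?_⟩ <;>
      rw [hstep] <;> simp [pvB_step] <;> split_ifs <;> simp <;> omega

theorem pv_maxRun_le (l : List Char) (sym : Char) : pvB_maxRun l sym ≤ l.length :=
  (pv_fold_char sym l).2.2

theorem pv_isIn_replicate (l : List Char) (sym : Char) (k : Nat) (hk : 1 ≤ k) :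
    PySem.Chars.isIn (List.replicate k sym) l = decide (k ≤ pvB_maxRun l sym) := by
  have h := ((pv_fold_char sym l).1 k hk).2
  unfold pvB_maxRun
  by_cases hc : k ≤ (l.foldl (pvB_step sym) (0, 0)).1
  · simp only [hc, decide_true]
    rw [PySem.Chars.isIn_iff_infix]
    exact h.mpr hc
  · simp only [hc, decide_false]
    rw [PySem.Chars.isIn_eq_false_iff]
    exact fun hi => hc (h.mp hi)

-- A's inner countdown over [10..6] returns exactly B's per-symbol decision.
theorem pv_scan_eq (t f s : List Char) (sym : Char)
    (hf : f.length ≤ 10) (hs : s.length ≤ 10) :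
    pvA_scan t f s sym [10, 9, 8, 7, 6] =
      (if 6 ≤ min (pvB_maxRun f sym) (pvB_maxRun s sym) then
        some ("ticket \"" ++ String.mk t ++ "\" - "
          ++ PySem.Int.toStr ((min (pvB_maxRun f sym) (pvB_maxRun s sym) : Nat) : Int)
          ++ String.mk [sym]
          ++ (if min (pvB_maxRun f sym) (pvB_maxRun s sym) == 10 then " Jackpot!" else ""))
      else none) := by
  have h1 := pv_maxRun_le f sym
  have h2 := pv_maxRun_le s sym
  have e1 : ∀ k : Nat, 1 ≤ k → PySem.Chars.isIn (List.replicate k sym) f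
      = decide (k ≤ pvB_maxRun f sym) := fun k hk => pv_isIn_replicate f sym k hk
  have e2 : ∀ k : Nat, 1 ≤ k → PySem.Chars.isIn (List.replicate k sym) s
      = decide (k ≤ pvB_maxRun s sym) := fun k hk => pv_isIn_replicate s sym k hk
  set r1 := pvB_maxRun f sym with hr1
  set r2 := pvB_maxRun s sym with hr2
  simp only [pvA_scan, List.length_replicate,
    e1 10 (by omega), e1 9 (by omega), e1 8 (by omega), e1 7 (by omega), e1 6 (by omega),
    e2 10 (by omega), e2 9 (by omega), e2 8 (by omega), e2 7 (by omega), e2 6 (by omega)]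
  have hb1 : r1 ≤ 10 := le_trans h1 hf
  have hb2 : r2 ≤ 10 := le_trans h2 hs
  simp only [Bool.and_eq_true, decide_eq_true_eq, ← le_min_iff]
  have hm10 : min r1 r2 ≤ 10 := le_trans (min_le_left _ _) hb1
  generalize hmm : min r1 r2 = m at *
  interval_cases m <;> norm_num

theorem pv_loop_eq (t f s : List Char)
    (hf : f.length ≤ 10) (hs : s.length ≤ 10) (syms : List Char) :
    (pvA_syms t f s syms).getD ("ticket \"" ++ String.mk t ++ "\" - no match")
      = pvB_loop t f s syms := by
  induction syms with
  | nil => simp [pvA_syms, pvB_loop]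
  | cons c rest ih =>
    rw [pvA_syms, pv_scan_eq t f s c hf hs]
    simp only [pvB_loop]
    by_cases h : 6 ≤ min (pvB_maxRun f c) (pvB_maxRun s c) <;> simp [h, ih]

-- ===== VERDICT (by name: the statement is the Claim_ definition above) =====
theorem check_if_winning_ticket_spec : Claim_equal_check_if_winning_ticket := by
  intro ticket _
  show check_if_winning_ticket ticket = check_if_winning_ticket_alt ticket
  simp only [check_if_winning_ticket, check_if_winning_ticket_alt]
  by_cases h : ((PySem.Str.strip ticket).toList).length = 20
  · have hf : (PySem.Chars.slice (PySem.Str.strip ticket).toList none (some 10)).length ≤ 10 := by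
      rw [PySem.Chars.slice_eq_listSlice, PySem.List.slice_to _ (by norm_num)]
      simp
    have hs : (PySem.Chars.slice (PySem.Str.strip ticket).toList (some 10) none).length ≤ 10 := by
      rw [PySem.Chars.slice_eq_listSlice, PySem.List.slice_from _ (by norm_num)]
      rw [List.length_drop]
      omega
    have h20 : ¬ ((PySem.Str.strip ticket).toList.length ≠ 20) := by omega
    rw [if_neg h20, if_neg h20]
    exact pv_loop_eq _ _ _ hf hs _
  · rw [if_pos h, if_pos h]
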